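-- pv_equiv track=rewrite | github.com/vTngyn/modelling | src/audioProcessing/segmentation/detectSilenceAndSaveAudioSegment.py | extract_speech_segments
-- ===== SOURCE A (Python) =====
-- def extract_speech_segments(vad_results):
--     segments = []
--     start = None
--
--     for i, is_speech in enumerate(vad_results):
--         if is_speech and start is None:
--             start = i
--         elif not is_speech and start is not None:
--             segments.append((start, i - 1))
--             start = None
--
--     if start is not None:
--         segments.append((start, len(vad_results) - 1))
--
--     return segments
-- ===== SOURCE B (Python) =====
-- def extract_speech_segments(vad_results):
--     # Run-grouping scan: consume each maximal run of equal truthiness at once,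
--     # instead of A's start=None sentinel state machine.
--     segments = []
--     i = 0
--     n = len(vad_results)
--     while i < n:
--         b = bool(vad_results[i])
--         j = i
--         while j < n and bool(vad_results[j]) == b:
--             j += 1
--         if b:
--             segments.append((i, j - 1))
--         i = j
--     return segments
-- ===== Notes on version B (the rewrite author's own statement) =====
-- stated objective: alternative
-- what changed: Replaced the start=None sentinel state machine with a two-pointer run-grouping scan that consumes each maximal run of equal flags at once and emits (start, end) per truthy run.
import Mathlib
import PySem

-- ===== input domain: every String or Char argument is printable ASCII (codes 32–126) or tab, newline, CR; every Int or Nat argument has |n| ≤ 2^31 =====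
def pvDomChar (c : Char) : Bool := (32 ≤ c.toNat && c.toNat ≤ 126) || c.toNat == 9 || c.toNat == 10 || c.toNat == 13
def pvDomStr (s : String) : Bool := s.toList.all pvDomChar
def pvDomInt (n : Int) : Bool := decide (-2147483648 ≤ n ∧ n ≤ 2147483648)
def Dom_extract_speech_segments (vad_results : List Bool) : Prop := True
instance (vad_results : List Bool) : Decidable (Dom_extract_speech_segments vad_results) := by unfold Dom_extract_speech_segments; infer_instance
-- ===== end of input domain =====

-- B replaces A's start=None sentinel state machine with a two-pointer run-grouping
-- scan (same O(n) cost, a different decomposition); A = B is proved on all inputs.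


-- ===== PORT A =====
-- the for-loop of A: state (segments, start), position i; when the list is exhausted
-- the pending segment (if any) is closed with end = len(vad_results) - 1 (= n - 1).
def extractGoA (xs : List Bool) (i : Int) (segments : List (Int × Int))
    (start : Option Int) (n : Int) : List (Int × Int) :=
  match xs with
  | [] =>
    match start with
    | some s => segments ++ [(s, n - 1)]
    | none => segments
  | is_speech :: rest =>
    match is_speech, start with
    | true, none => extractGoA rest (i + 1) segments (some i) n
    | false, some s => extractGoA rest (i + 1) (segments ++ [(s, i - 1)]) none n
    | _, _ => extractGoA rest (i + 1) segments start n

def extract_speech_segments (vad_results : List Bool) : List (Int × Int) :=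
  extractGoA vad_results 0 [] none (vad_results.length : Int)

-- ===== PORT B =====
-- Source B's outer while loop: each step consumes one maximal run of flags equal to the
-- head b (the inner `while j < n and vad_results[j] == b` scan = takeWhile/dropWhile)
-- and, for a truthy run, emits (i, i + len - 1).
def extractGoB : List Bool → Int → List (Int × Int)
  | [], _ => []
  | b :: rest, i =>
    let run := (b :: rest).takeWhile (· == b)
    let rst := (b :: rest).dropWhile (· == b)
    let len : Int := (run.length : Int)
    (if b then [(i, i + len - 1)] else []) ++ extractGoB rst (i + len)
  termination_by xs _ => xs.length
  decreasing_by
    simp only [List.dropWhile_cons, beq_self_eq_true, if_true]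
    exact Nat.lt_succ_of_le (List.length_dropWhile_le _ _)

def extract_speech_segments_alt (vad_results : List Bool) : List (Int × Int) :=
  extractGoB vad_results 0

-- ===== PRECONDITION & SPEC =====
def Spec_extract_speech_segments (vad_results : List Bool) (out : List (Int × Int)) : Prop := out = extract_speech_segments_alt vad_results
instance (vad_results : List Bool) (out : List (Int × Int)) : Decidable (Spec_extract_speech_segments vad_results out) := by unfold Spec_extract_speech_segments; infer_instance

-- ===== CLAIM (what is proved, stated in full; the proofs are below) =====
def Claim_equal_extract_speech_segments : Prop := ∀ (vad_results : List Bool), Dom_extract_speech_segments vad_results → Spec_extract_speech_segments vad_results (extract_speech_segments vad_results)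

-- ===== LEMMAS AND PROOFS =====

theorem goB_nil (i : Int) : extractGoB [] i = [] := by rw [extractGoB]

theorem goB_cons (b : Bool) (rest : List Bool) (i : Int) :
    extractGoB (b :: rest) i =
      (if b then [(i, i + ((rest.takeWhile (· == b)).length + 1 : Nat) - 1)] else []) ++
        extractGoB (rest.dropWhile (· == b)) (i + ((rest.takeWhile (· == b)).length + 1 : Nat)) := by
  rw [extractGoB]; simp

-- a leading `false` run boundary can be peeled one element at a time: it emits nothing.
theorem goB_false_cons (rest : List Bool) (i : Int) :
    extractGoB (false :: rest) i = extractGoB rest (i + 1) := by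
  cases rest with
  | nil => simp [goB_cons, goB_nil]
  | cons b' rest' =>
    cases b' with
    | false =>
      rw [goB_cons, goB_cons]
      simp only [Bool.false_eq_true, if_false, List.takeWhile_cons, List.dropWhile_cons,
        beq_self_eq_true, if_true, List.length_cons, List.nil_append]
      congr 1
      push_cast; ring
    | true =>
      rw [goB_cons]
      simp

-- main invariant: A's loop from any position equals B's run-grouping from there,
-- both with start = none (left) and with a pending segment open since s (right).
theorem extractGoA_eq :
    ∀ (xs : List Bool) (i : Int) (segs : List (Int × Int)),
      (extractGoA xs i segs none (i + (xs.length : Int)) = segs ++ extractGoB xs i) ∧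
      (∀ s : Int, extractGoA xs i segs (some s) (i + (xs.length : Int)) =
        segs ++ [(s, i + ((xs.takeWhile (· == true)).length : Int) - 1)] ++
          extractGoB (xs.dropWhile (· == true)) (i + ((xs.takeWhile (· == true)).length : Int))) := by
  intro xs
  induction xs with
  | nil =>
    intro i segs
    refine ⟨by simp [extractGoA, goB_nil], fun s => ?_⟩
    simp [extractGoA, goB_nil]
  | cons b rest ih =>
    intro i segs
    cases b with
    | true =>
      constructor
      · show extractGoA rest (i + 1) segs (some i) (i + ((true :: rest).length : Int)) = _
        rw [show i + (((true :: rest).length : Nat) : Int) = (i + 1) + (rest.length : Int) by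
              simp; ring]
        rw [(ih (i + 1) segs).2 i, goB_cons]
        simp only [if_true, List.append_assoc]
        push_cast
        ring_nf
      · intro s
        show extractGoA rest (i + 1) segs (some s) (i + ((true :: rest).length : Int)) = _
        rw [show i + (((true :: rest).length : Nat) : Int) = (i + 1) + (rest.length : Int) by
              simp; ring]
        rw [(ih (i + 1) segs).2 s]
        simp only [List.takeWhile_cons, List.dropWhile_cons, beq_self_eq_true, if_true,
          List.length_cons, List.append_assoc]
        push_cast
        ring_nf
    | false =>
      constructor
      · show extractGoA rest (i + 1) segs none (i + ((false :: rest).length : Int)) = _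
        rw [show i + (((false :: rest).length : Nat) : Int) = (i + 1) + (rest.length : Int) by
              simp; ring]
        rw [(ih (i + 1) segs).1, goB_false_cons]
      · intro s
        show extractGoA rest (i + 1) (segs ++ [(s, i - 1)]) none (i + ((false :: rest).length : Int)) = _
        rw [show i + (((false :: rest).length : Nat) : Int) = (i + 1) + (rest.length : Int) by
              simp; ring]
        rw [(ih (i + 1) (segs ++ [(s, i - 1)])).1]
        simp [goB_false_cons]

-- ===== VERDICT (by name: the statement is the Claim_ definition above) =====
theorem extract_speech_segments_spec : Claim_equal_extract_speech_segments := by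
  intro vad _
  unfold Spec_extract_speech_segments extract_speech_segments extract_speech_segments_alt
  have h := (extractGoA_eq vad 0 []).1
  simpa using h
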